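-- pv_equiv track=rewrite | github.com/Sixchalice/Solutions57 | SectionTwo/q3.py | is_sorted_polyndrom
-- ===== SOURCE A (Python) =====
-- def is_sorted_polyndrom(sqc: str):
--     rev_sqc = sqc[::-1]
--     mid_index = len(sqc) // 2 + 1
--     if sqc != rev_sqc:
--         return False
--
--     for i in range(1, mid_index):
--         if sqc[i] < sqc[i - 1]:
--             return False
--     return True
-- ===== SOURCE B (Python) =====
-- def is_sorted_polyndrom(sqc: str):
--     n = len(sqc)
--     half = n // 2
--     for i in range(half + 1):
--         if i >= 1 and sqc[i] < sqc[i - 1]: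
--             return False
--         if i < half and sqc[i] != sqc[n - 1 - i]:
--             return False
--     return True
-- ===== Notes on version B (the rewrite author's own statement) =====
-- stated objective: alternative
-- what changed: Fuses A's two passes (materialize the reversed string and compare, then a separate sorted-prefix loop) into one single in-place loop over the first half that does the two-pointer palindrome test and the non-decreasing test together, never building the reversed string.
import Mathlib
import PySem

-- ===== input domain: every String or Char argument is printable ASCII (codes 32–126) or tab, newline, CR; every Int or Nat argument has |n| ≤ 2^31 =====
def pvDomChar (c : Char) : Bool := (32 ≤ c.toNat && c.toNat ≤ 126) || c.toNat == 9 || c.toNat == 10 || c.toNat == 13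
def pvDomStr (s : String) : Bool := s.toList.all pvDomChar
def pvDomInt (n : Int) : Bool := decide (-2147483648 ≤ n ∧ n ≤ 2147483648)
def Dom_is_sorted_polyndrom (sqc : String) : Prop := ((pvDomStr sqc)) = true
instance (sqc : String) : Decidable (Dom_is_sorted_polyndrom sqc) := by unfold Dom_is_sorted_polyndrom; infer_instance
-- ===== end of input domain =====

-- B fuses A's two passes (build reversed string + compare, then a sorted-prefix loop) into one
-- single loop over the first half doing the two-pointer palindrome test and the order test together.


-- ===== PORT A =====
-- the for-loop of A; indices drawn from range(1, mid_index) are always in bounds, so the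
-- total pyGetD (default never read) is exact here
def pvALoop (l : List Char) : List Int → Bool
  | [] => true
  | i :: rest =>
    if PySem.List.pyGetD l i ' ' < PySem.List.pyGetD l (i - 1) ' ' then false
    else pvALoop l rest

def is_sorted_polyndrom (sqc : String) : Bool :=
  let l := sqc.toList
  -- rev_sqc = sqc[::-1]; step -1 is never 0, so getD's default is never read
  let rev_sqc := (PySem.List.slice? l none none (-1)).getD []
  let mid_index : Int := PySem.Int.floordiv (l.length : Int) 2 + 1
  if l ≠ rev_sqc then false
  else pvALoop l (PySem.List.pyRange 1 mid_index 1)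

-- ===== PORT B =====
-- the fused loop of B; all indices are in bounds, so the total pyGetD is exact
def pvBLoop (l : List Char) (n half : Int) : List Int → Bool
  | [] => true
  | i :: rest =>
    if 1 ≤ i ∧ PySem.List.pyGetD l i ' ' < PySem.List.pyGetD l (i - 1) ' ' then false
    else if i < half ∧ PySem.List.pyGetD l i ' ' ≠ PySem.List.pyGetD l (n - 1 - i) ' ' then false
    else pvBLoop l n half rest

def is_sorted_polyndrom_alt (sqc : String) : Bool :=
  let l := sqc.toList
  let n : Int := l.length
  let half : Int := PySem.Int.floordiv n 2
  pvBLoop l n half (PySem.List.pyRange 0 (half + 1) 1)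

-- ===== PRECONDITION & SPEC =====
def Spec_is_sorted_polyndrom (sqc : String) (out : Bool) : Prop := out = is_sorted_polyndrom_alt sqc
instance (sqc : String) (out : Bool) : Decidable (Spec_is_sorted_polyndrom sqc out) := by unfold Spec_is_sorted_polyndrom; infer_instance

-- ===== CLAIM (what is proved, stated in full; the proofs are below) =====
def Claim_equal_is_sorted_polyndrom : Prop := ∀ (sqc : String), Dom_is_sorted_polyndrom sqc → Spec_is_sorted_polyndrom sqc (is_sorted_polyndrom sqc)

-- ===== LEMMAS AND PROOFS =====

theorem pvALoop_eq_all (l : List Char) (idxs : List Int) :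
    pvALoop l idxs = idxs.all
      (fun i => !(decide (PySem.List.pyGetD l i ' ' < PySem.List.pyGetD l (i - 1) ' '))) := by
  induction idxs with
  | nil => rfl
  | cons i rest ih =>
    simp only [pvALoop, List.all_cons, ih]
    by_cases h : PySem.List.pyGetD l i ' ' < PySem.List.pyGetD l (i - 1) ' ' <;> simp [h]

theorem pvBLoop_eq_all (l : List Char) (n half : Int) (idxs : List Int) :
    pvBLoop l n half idxs = idxs.all
      (fun i => !(decide (1 ≤ i ∧ PySem.List.pyGetD l i ' ' < PySem.List.pyGetD l (i - 1) ' '))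
        && !(decide (i < half ∧ PySem.List.pyGetD l i ' ' ≠ PySem.List.pyGetD l (n - 1 - i) ' '))) := by
  induction idxs with
  | nil => rfl
  | cons i rest ih =>
    simp only [pvBLoop, List.all_cons, ih]
    by_cases h1 : 1 ≤ i ∧ PySem.List.pyGetD l i ' ' < PySem.List.pyGetD l (i - 1) ' '
    · simp [h1]
    · by_cases h2 : i < half ∧ PySem.List.pyGetD l i ' ' ≠ PySem.List.pyGetD l (n - 1 - i) ' '
      · simp [h1, h2]
      · simp [h1, h2]

theorem pyGetD_toNat (l : List Char) (i : Int) (d : Char) (h : 0 ≤ i) :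
    PySem.List.pyGetD l i d = l.getD i.toNat d := by
  have h2 : i = ((i.toNat : Nat) : Int) := (Int.toNat_of_nonneg h).symm
  rw [h2, PySem.List.pyGetD_natCast]
  simp [show max i 0 = i from by omega]

theorem pal_iff_getD (l : List Char) :
    l = l.reverse ↔ ∀ k, k < l.length → l.getD k ' ' = l.getD (l.length - 1 - k) ' ' := by
  constructor
  · intro h k hk
    have h2 : l.getD k ' ' = l.reverse.getD k ' ' := by rw [← h]
    rw [h2, List.getD_eq_getElem?_getD, List.getElem?_reverse hk, ← List.getD_eq_getElem?_getD]
  · intro h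
    apply List.ext_getElem (by simp)
    intro i h1 h2
    have hi : i < l.length := h1
    have heq := h i hi
    rw [List.getD_eq_getElem _ _ hi, List.getD_eq_getElem _ _ (by omega)] at heq
    rw [heq]
    rw [show l.reverse[i] = l[l.length - 1 - i]'(by omega) from by rw [List.getElem_reverse]]

theorem core (l : List Char) :
    (if l ≠ (PySem.List.slice? l none none (-1)).getD [] then false
     else pvALoop l (PySem.List.pyRange 1 (PySem.Int.floordiv (l.length : Int) 2 + 1) 1))
    = pvBLoop l (l.length : Int) (PySem.Int.floordiv (l.length : Int) 2)
        (PySem.List.pyRange 0 (PySem.Int.floordiv (l.length : Int) 2 + 1) 1) := by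
  have hfd : PySem.Int.floordiv (l.length : Int) 2 = ((l.length / 2 : Nat) : Int) :=
    PySem.Int.floordiv_natCast l.length 2
  simp only [PySem.List.slice?_none_none_neg_one, Option.getD_some, hfd]
  set N := l.length with hN
  set half := N / 2 with hhalf
  rw [pvBLoop_eq_all, pvALoop_eq_all]
  by_cases hpal : l = l.reverse
  · -- palindrome: compare the two loops
    rw [if_neg (not_not_intro hpal)]
    rw [Bool.eq_iff_iff, List.all_eq_true, List.all_eq_true]
    constructor
    · intro h i hi
      rw [PySem.List.mem_pyRange_one] at hi
      simp only [Bool.and_eq_true, Bool.not_eq_true', decide_eq_false_iff_not]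
      constructor
      · rintro ⟨h1, hlt⟩
        have := h i (by rw [PySem.List.mem_pyRange_one]; omega)
        simp only [Bool.not_eq_true', decide_eq_false_iff_not] at this
        exact this hlt
      · rintro ⟨h1, hne⟩
        apply hne
        have hklt : i.toNat < N := by omega
        have := (pal_iff_getD l).mp hpal i.toNat hklt
        rw [pyGetD_toNat _ _ _ (by omega), pyGetD_toNat _ _ _ (by omega),
          show ((N:Int) - 1 - i).toNat = N - 1 - i.toNat by omega]
        exact this
    · intro h i hi
      rw [PySem.List.mem_pyRange_one] at hi
      have := h i (by rw [PySem.List.mem_pyRange_one]; omega)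
      simp only [Bool.and_eq_true, Bool.not_eq_true', decide_eq_false_iff_not] at this ⊢
      intro hlt
      exact this.1 ⟨by omega, hlt⟩
  · -- not a palindrome: both sides false
    rw [if_pos hpal]
    symm
    rw [List.all_eq_false]
    have hex : ∃ k, k < half ∧ l.getD k ' ' ≠ l.getD (N - 1 - k) ' ' := by
      rw [pal_iff_getD] at hpal
      push Not at hpal
      obtain ⟨k, hk, hne⟩ := hpal
      by_cases hk2 : k < half
      · exact ⟨k, hk2, hne⟩
      · have hkk : k ≠ N - 1 - k := fun e => hne (by rw [← e])
        refine ⟨N - 1 - k, by omega, ?_⟩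
        rw [show N - 1 - (N - 1 - k) = k by omega]
        exact fun h => hne h.symm
    obtain ⟨k, hk, hne⟩ := hex
    refine ⟨(k : Int), by rw [PySem.List.mem_pyRange_one]; omega, ?_⟩
    simp only [Bool.and_eq_true, Bool.not_eq_true', decide_eq_false_iff_not, not_and, not_not, Classical.not_imp]
    intro _
    refine ⟨by omega, ?_⟩
    rw [pyGetD_toNat _ _ _ (by omega), pyGetD_toNat _ _ _ (by omega),
      Int.toNat_natCast, show ((N:Int) - 1 - (k:Int)).toNat = N - 1 - k by omega]
    exact hne

-- ===== VERDICT (by name: the statement is the Claim_ definition above) =====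
theorem is_sorted_polyndrom_spec : Claim_equal_is_sorted_polyndrom := by
  intro sqc _
  unfold Spec_is_sorted_polyndrom is_sorted_polyndrom is_sorted_polyndrom_alt
  exact core sqc.toList
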